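-- pv_equiv track=rewrite | github.com/ccollado7/UNSAM---Python | Revision de Pares/Semana N°2/Caso 2/02-2-e.g-arboles.py-jim-2020-08-18_21.04.09.py | contar_ejemplares
-- ===== SOURCE A (Python) =====
-- def contar_ejemplares (lista_arboles):
--     ejem = {}
--     for arbol in lista_arboles:
--         try:
--             ejem[arbol["nombre_com"]] += 1
--         except KeyError:
--             ejem[arbol["nombre_com"]] = 1
--     return (ejem)
-- ===== SOURCE B (Python) =====
-- def contar_ejemplares(lista_arboles):
--     nombres = [arbol["nombre_com"] for arbol in lista_arboles]
--     return {nombre: nombres.count(nombre) for nombre in dict.fromkeys(nombres)}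
-- ===== Notes on version B (the rewrite author's own statement) =====
-- stated objective: simpler
-- what changed: Replaces the try/except one-pass hash accumulation with a two-phase pipeline: extract the name list, dedup it in first-occurrence order via dict.fromkeys, and build the dict with one count() scan per distinct name.
import Mathlib
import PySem

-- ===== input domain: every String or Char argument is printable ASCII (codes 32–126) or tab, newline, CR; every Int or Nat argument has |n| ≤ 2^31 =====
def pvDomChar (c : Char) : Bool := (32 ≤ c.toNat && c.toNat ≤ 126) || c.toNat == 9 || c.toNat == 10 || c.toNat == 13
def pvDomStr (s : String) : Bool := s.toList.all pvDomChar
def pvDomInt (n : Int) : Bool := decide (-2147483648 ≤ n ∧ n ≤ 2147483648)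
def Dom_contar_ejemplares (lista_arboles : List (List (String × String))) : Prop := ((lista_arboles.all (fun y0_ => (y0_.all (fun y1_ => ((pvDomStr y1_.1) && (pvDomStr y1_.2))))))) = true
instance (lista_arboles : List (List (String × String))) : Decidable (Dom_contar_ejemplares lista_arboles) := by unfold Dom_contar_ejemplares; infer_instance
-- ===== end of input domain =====

-- B replaces A's try/except one-pass hash accumulation by a two-phase pipeline
-- (extract names, dedup in first-occurrence order, count each distinct name): simpler, not faster.


-- ===== PORT A =====
def contar_ejemplares (lista_arboles : List (List (String × String))) : List (String × Int) :=
  (lista_arboles.foldl (fun ejem arbol =>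
      match PySem.Dict.get? (PySem.Dict.mk arbol) "nombre_com" with
      | some nom =>
        match PySem.Dict.get? ejem nom with
        | some v => PySem.Dict.insert ejem nom (v + 1)   -- ejem[nom] += 1
        | none   => PySem.Dict.insert ejem nom 1         -- except KeyError: ejem[nom] = 1
      | none => ejem)  -- Python raises KeyError here; these inputs are excluded by Pre_
    (PySem.Dict.empty)).items

-- ===== PORT B =====
def contar_ejemplares_alt (lista_arboles : List (List (String × String))) : List (String × Int) :=
  let nombres := lista_arboles.filterMap (fun arbol => PySem.Dict.get? (PySem.Dict.mk arbol) "nombre_com")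
  (PySem.List.dedup nombres).map (fun nombre => (nombre, (PySem.List.count nombres nombre : Int)))

-- ===== PRECONDITION & SPEC =====
-- Pre_ excludes exactly the inputs where some tree lacks the key "nombre_com": there Python A raises KeyError.
def Pre_contar_ejemplares (lista_arboles : List (List (String × String))) : Prop :=
  (lista_arboles.all (fun arbol => arbol.any (fun p => p.1 == "nombre_com"))) = true
instance (lista_arboles : List (List (String × String))) : Decidable (Pre_contar_ejemplares lista_arboles) := by unfold Pre_contar_ejemplares; infer_instance

def pvWitness_contar_ejemplares : (List (List (String × String))) :=
  [[("nombre_com", "Jacaranda")], [("nombre_com", "Palo borracho"), ("altura", "10")], [("nombre_com", "Jacaranda")]]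

def Spec_contar_ejemplares (lista_arboles : List (List (String × String))) (out : List (String × Int)) : Prop := out = contar_ejemplares_alt lista_arboles
instance (lista_arboles : List (List (String × String))) (out : List (String × Int)) : Decidable (Spec_contar_ejemplares lista_arboles out) := by unfold Spec_contar_ejemplares; infer_instance

-- ===== CLAIM (what is proved, stated in full; the proofs are below) =====
def Claim_equal_contar_ejemplares : Prop := ∀ (lista_arboles : List (List (String × String))), Dom_contar_ejemplares lista_arboles → Pre_contar_ejemplares lista_arboles → Spec_contar_ejemplares lista_arboles (contar_ejemplares lista_arboles)

-- ===== LEMMAS AND PROOFS =====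

-- A's loop over the trees is the Counter loop over the extracted names:
-- the try/except step on a present name is d.insert nom (d.getD nom 0 + 1), and trees without
-- the key (excluded by Pre_, where Python raises) leave the accumulator unchanged.
theorem contar_fold_eq (l : List (List (String × String))) (d : PySem.Dict String Int) :
    (l.foldl (fun ejem arbol =>
      match PySem.Dict.get? (PySem.Dict.mk arbol) "nombre_com" with
      | some nom =>
        match PySem.Dict.get? ejem nom with
        | some v => PySem.Dict.insert ejem nom (v + 1)
        | none   => PySem.Dict.insert ejem nom 1
      | none => ejem) d)
    = (l.filterMap (fun arbol => PySem.Dict.get? (PySem.Dict.mk arbol) "nombre_com")).foldl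
        (fun ejem nom => PySem.Dict.insert ejem nom (PySem.Dict.getD ejem nom 0 + 1)) d := by
  induction l generalizing d with
  | nil => rfl
  | cons a t ih =>
    simp only [List.foldl_cons, List.filterMap_cons]
    cases h : PySem.Dict.get? (PySem.Dict.mk a) "nombre_com" with
    | none => simp [ih]
    | some nom =>
      simp only [List.foldl_cons]
      rw [ih]
      congr 1
      cases h2 : PySem.Dict.get? d nom <;> simp [PySem.Dict.getD, h2]

-- ===== VERDICT (by name: the statement is the Claim_ definition above) =====
theorem contar_ejemplares_spec : Claim_equal_contar_ejemplares := by
  intro lista _ _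
  unfold Spec_contar_ejemplares contar_ejemplares contar_ejemplares_alt
  rw [contar_fold_eq, PySem.Dict.foldl_insert_getD_add_one_eq_counter, PySem.Dict.items_counter]
  simp [PySem.List.dedup_eq_ofList, PySem.List.count_eq]
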